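-- pv_equiv track=rewrite | github.com/DevNoteKeeper/Advent-of-Code-2025 | day_8.py | connect_closest
-- ===== SOURCE A (Python) =====
-- import heapq
-- from itertools import combinations
--
-- class UnionFind:
--     def __init__(self, n):
--         self.parent = list(range(n))
--         self.size = [1]*n  # 각 component 크기
--
--     def find(self, x):
--         if self.parent[x] != x:
--             self.parent[x] = self.find(self.parent[x])
--         return self.parent[x]
--
--     def union(self, x, y):
--         xr = self.find(x)
--         yr = self.find(y)
--         if xr == yr:
--             return False
--         if self.size[xr] < self.size[yr]:
--             xr, yr = yr, xr
--         self.parent[yr] = xr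
--         self.size[xr] += self.size[yr]
--         return True
--
-- def distance_squared(p1, p2):
--     # 변경: sqrt 제거 → 비교만 필요, 속도/정확도 향상
--     return (p1[0]-p2[0])**2 + (p1[1]-p2[1])**2 + (p1[2]-p2[2])**2
--
-- def generate_edges(points):
--     for i, j in combinations(range(len(points)), 2):
--         yield (distance_squared(points[i], points[j]), i, j)
--
-- def connect_closest(points, num_connections=1000):
--     n = len(points)
--     uf = UnionFind(n)
--
--     # 변경: generator를 바로 heap에 push → 메모리 최적화
--     min_heap = []
--     for edge in generate_edges(points):
--         heapq.heappush(min_heap, edge)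
--
--     # 가능한 최대 연결보다 num_connections 크면 제한
--     max_possible_connections = n*(n-1)//2
--     num_connections = min(num_connections, max_possible_connections)
--
--     # 변경: 문제 요구사항에 맞게 union 성공 여부와 관계없이 가장 가까운 num_connections 쌍 사용
--     connections_done = 0
--     while min_heap and connections_done < num_connections:
--         d, i, j = heapq.heappop(min_heap)
--         uf.union(i, j)  # 성공 여부와 관계없이 count
--         connections_done += 1
--
--     # component 크기 계산
--     sizes = {}
--     for idx in range(n):
--         root = uf.find(idx)
--         sizes[root] = uf.size[root]
--
--     # 상위 3개 component 곱 계산, 부족하면 1로 채움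
--     top3 = sorted(sizes.values(), reverse=True)[:3]
--     while len(top3) < 3:
--         top3.append(1)  # 부족하면 1로 채움
--
--     return top3[0] * top3[1] * top3[2]
-- ===== SOURCE B (Python) =====
-- def connect_closest(points, num_connections=1000):
--     n = len(points)
--     edges = sorted(
--         ((points[i][0] - points[j][0]) ** 2
--          + (points[i][1] - points[j][1]) ** 2
--          + (points[i][2] - points[j][2]) ** 2, i, j)
--         for i in range(n) for j in range(i + 1, n))
--     # no union-find: comp[v] is v's component label; a merge rewrites every
--     # occurrence of the absorbed label, so labels directly partition the nodes
--     comp = list(range(n))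
--     for _, i, j in edges[:max(num_connections, 0)]:
--         ci, cj = comp[i], comp[j]
--         if ci != cj:
--             comp = [ci if c == cj else c for c in comp]
--     counts = {}
--     for c in comp:
--         counts[c] = counts.get(c, 0) + 1
--     top = sorted(counts.values(), reverse=True) + [1, 1, 1]
--     return top[0] * top[1] * top[2]
-- ===== Notes on version B (the rewrite author's own statement) =====
-- stated objective: alternative
-- what changed: B removes the union-find entirely: it sorts the edge list once (lexicographic tuple order), merges components by rewriting labels in a flat node-to-label array, and reads component sizes off a plain label counter, instead of A's heap-push/pop loop over a path-compressed, size-balanced union-find followed by a root-size dict.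
import Mathlib
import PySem

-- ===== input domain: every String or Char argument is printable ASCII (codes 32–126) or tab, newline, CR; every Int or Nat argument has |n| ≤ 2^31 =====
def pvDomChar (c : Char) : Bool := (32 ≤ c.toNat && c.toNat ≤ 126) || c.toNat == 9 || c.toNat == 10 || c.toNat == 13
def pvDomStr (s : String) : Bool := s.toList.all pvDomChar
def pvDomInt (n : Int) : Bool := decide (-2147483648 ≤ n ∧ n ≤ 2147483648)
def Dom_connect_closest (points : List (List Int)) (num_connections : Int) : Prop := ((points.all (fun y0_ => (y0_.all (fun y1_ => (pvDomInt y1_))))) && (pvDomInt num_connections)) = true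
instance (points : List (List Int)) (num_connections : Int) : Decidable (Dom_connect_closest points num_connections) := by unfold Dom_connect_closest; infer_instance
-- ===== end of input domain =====

-- B drops the union-find entirely: it sorts the edge list once, merges components by
-- rewriting labels in a direct node→label array, and counts labels; return value only.

-- ===== PORT A =====
def pvGetI (xs : List Int) (i : Int) : Int := PySem.List.pyGetD xs i 0

def pvDist2 (p q : List Int) : Int :=
  (pvGetI p 0 - pvGetI q 0) ^ 2 + (pvGetI p 1 - pvGetI q 1) ^ 2 + (pvGetI p 2 - pvGetI q 2) ^ 2

-- find(x) with path compression; fuel = len(parent) bounds the (acyclic) parent chain,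
-- so the 0-fuel branch is never reached on a real execution
def pvFind : Nat → List Int → Int → List Int × Int
  | 0, parent, x => (parent, x)
  | fuel + 1, parent, x =>
    let px := pvGetI parent x
    if px = x then (parent, x)
    else
      let r := pvFind fuel parent px
      (r.1.set x.toNat r.2, r.2)   -- indices are always 0 ≤ x < n here, so .toNat is exact

def pvUnion (st : List Int × List Int) (x y : Int) : List Int × List Int :=
  let f1 := pvFind st.1.length st.1 x
  let f2 := pvFind f1.1.length f1.1 y
  if f1.2 = f2.2 then (f2.1, st.2)
  else
    let p := if pvGetI st.2 f1.2 < pvGetI st.2 f2.2 then (f2.2, f1.2) else (f1.2, f2.2)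
    (f2.1.set p.2.toNat p.1, st.2.set p.1.toNat (pvGetI st.2 p.1 + pvGetI st.2 p.2))

-- the 'sizes' dict loop
def pvSizes (n : Nat) (st : List Int × List Int) : PySem.Dict Int Int :=
  ((PySem.List.pyRange 0 n 1).foldl
    (fun (s : List Int × PySem.Dict Int Int) idx =>
      let f := pvFind s.1.length s.1 idx
      (f.1, s.2.insert f.2 (pvGetI st.2 f.2)))
    (st.1, PySem.Dict.empty)).2

def pvEdge (points : List (List Int)) (i j : Int) : Int × Int × Int :=
  (pvDist2 (PySem.List.pyGetD points i []) (PySem.List.pyGetD points j []), i, j)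

-- generate_edges: combinations(range(n), 2)
def pvEdgesA (points : List (List Int)) : List (Int × Int × Int) :=
  (PySem.List.combinations (PySem.List.pyRange 0 points.length 1) 2).map
    (fun c => pvEdge points (c.getD 0 0) (c.getD 1 0))

-- Python tuple comparison on (d, i, j), as a Bool
def edgeLe (a b : Int × Int × Int) : Bool :=
  decide (a.1 < b.1 ∨ (a.1 = b.1 ∧ (a.2.1 < b.2.1 ∨ (a.2.1 = b.2.1 ∧ a.2.2 ≤ b.2.2))))

-- heapq modelled as a multiset: heappush = append, heappop = remove the minimum;
-- exact for the observable sequence of popped values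
def popMin : List (Int × Int × Int) → Option ((Int × Int × Int) × List (Int × Int × Int))
  | [] => none
  | e :: rest =>
    match popMin rest with
    | none => some (e, [])
    | some (m, rest') => if edgeLe e m then some (e, rest) else some (m, e :: rest')

theorem popMin_none_iff : ∀ {l : List (Int × Int × Int)}, popMin l = none ↔ l = [] := by
  intro l
  induction l with
  | nil => simp [popMin]
  | cons x xs ih =>
    simp only [popMin]
    cases hx : popMin xs with
    | none => simp
    | some p =>
      obtain ⟨m, rest'⟩ := p
      by_cases hc : edgeLe x m = true <;> simp [hc]

theorem popMin_length : ∀ {l : List (Int × Int × Int)} {e rest}, popMin l = some (e, rest) → rest.length + 1 = l.length := by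
  intro l
  induction l with
  | nil => intro e rest h; simp [popMin] at h
  | cons x xs ih =>
    intro e rest h
    simp only [popMin] at h
    cases hx : popMin xs with
    | none =>
      rw [hx] at h
      obtain rfl : xs = [] := popMin_none_iff.mp hx
      simp at h
      simp [h.2]
    | some p =>
      obtain ⟨m, rest'⟩ := p
      rw [hx] at h
      have h2 := ih (e := m) (rest := rest') (by rw [hx])
      by_cases hc : edgeLe x m = true
      · simp [hc] at h
        simp [h.2]
      · simp [hc] at h
        rw [← h.2]
        simp
        omega

-- the while-pop-union loop of A
def popLoop (heap : List (Int × Int × Int)) (c m : Int) (st : List Int × List Int) : List Int × List Int :=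
  if heap ≠ [] ∧ c < m then
    match h : popMin heap with
    | none => st
    | some er => popLoop er.2 (c + 1) m (pvUnion st er.1.2.1 er.1.2.2)
  else st
termination_by heap.length
decreasing_by
  have := popMin_length h
  omega

def padLoop (l : List Int) : List Int :=
  if l.length < 3 then padLoop (l ++ [1]) else l
termination_by 3 - l.length
decreasing_by
  simp
  omega

def connect_closest (points : List (List Int)) (num_connections : Int) : Int :=
  let n := points.length
  let st : List Int × List Int := (PySem.List.pyRange 0 n 1, List.replicate n 1)
  let heap := (pvEdgesA points).foldl (fun h e => h ++ [e]) []
  let m := min num_connections (PySem.Int.floordiv ((n : Int) * ((n : Int) - 1)) 2)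
  let st2 := popLoop heap 0 m st
  let sizes := pvSizes n st2
  let top3 := padLoop ((PySem.List.sorted sizes.values (fun v => v) true).take 3)
  pvGetI top3 0 * pvGetI top3 1 * pvGetI top3 2

-- ===== PORT B =====
-- edges built by the nested comprehension inside sorted(...)
def pvEdgesB (points : List (List Int)) : List (Int × Int × Int) :=
  (PySem.List.pyRange 0 points.length 1).flatMap (fun i =>
    (PySem.List.pyRange (i + 1) points.length 1).map (fun j => pvEdge points i j))

-- sorted(...) on 3-tuples: stable insertion sort under Python's lexicographic tuple
-- order (exact: edgeLe is Python's tuple ≤, and the sort is stable)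
def pvInsertEdge (e : Int × Int × Int) : List (Int × Int × Int) → List (Int × Int × Int)
  | [] => [e]
  | x :: xs => if edgeLe x e then x :: pvInsertEdge e xs else e :: x :: xs

-- one merge step on the label array: comp = [ci if c == cj else c for c in comp]
def pvCompUnion (comp : List Int) (i j : Int) : List Int :=
  let ci := pvGetI comp i
  let cj := pvGetI comp j
  if ci ≠ cj then comp.map (fun c => if c = cj then ci else c) else comp

def connect_closest_alt (points : List (List Int)) (num_connections : Int) : Int :=
  let n := points.length
  let edges := (pvEdgesB points).foldr pvInsertEdge []
  let chosen := edges.take (max num_connections 0).toNat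
  let comp := chosen.foldl (fun c e => pvCompUnion c e.2.1 e.2.2) (PySem.List.pyRange 0 n 1)
  let counts := comp.foldl (fun (d : PySem.Dict Int Int) c => d.insert c (d.getD c 0 + 1)) PySem.Dict.empty
  let top := PySem.List.sorted counts.values (fun v => v) true ++ [1, 1, 1]
  pvGetI top 0 * pvGetI top 1 * pvGetI top 2

-- ===== PRECONDITION & SPEC =====
-- Pre_ excludes exactly the inputs on which A raises IndexError: a point with fewer
-- than 3 coordinates while there are at least two points (so some pair is evaluated).
def Pre_connect_closest (points : List (List Int)) (num_connections : Int) : Prop :=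
  2 ≤ points.length → ∀ p ∈ points, 3 ≤ p.length
instance (points : List (List Int)) (num_connections : Int) : Decidable (Pre_connect_closest points num_connections) := by unfold Pre_connect_closest; infer_instance

def pvWitness_connect_closest : List (List Int) × Int := ([[0, 0, 0], [1, 1, 1], [2, 2, 2], [5, 5, 5]], 2)

def Spec_connect_closest (points : List (List Int)) (num_connections : Int) (out : Int) : Prop := out = connect_closest_alt points num_connections
instance (points : List (List Int)) (num_connections : Int) (out : Int) : Decidable (Spec_connect_closest points num_connections out) := by unfold Spec_connect_closest; infer_instance

-- ===== CLAIM (what is proved, stated in full; the proofs are below) =====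
def Claim_equal_connect_closest : Prop := ∀ (points : List (List Int)) (num_connections : Int), Dom_connect_closest points num_connections → Pre_connect_closest points num_connections → Spec_connect_closest points num_connections (connect_closest points num_connections)

-- ===== LEMMAS AND PROOFS =====

-- edge order: reflexive, transitive, total, antisymmetric
theorem edgeLe_refl (a : Int × Int × Int) : edgeLe a a = true := by
  obtain ⟨a1, a2, a3⟩ := a
  simp [edgeLe]

theorem edgeLe_trans {a b c : Int × Int × Int} (h1 : edgeLe a b = true) (h2 : edgeLe b c = true) : edgeLe a c = true := by
  obtain ⟨a1, a2, a3⟩ := a; obtain ⟨b1, b2, b3⟩ := b; obtain ⟨c1, c2, c3⟩ := c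
  simp [edgeLe] at *
  omega

theorem edgeLe_total {a b : Int × Int × Int} (h : ¬ edgeLe a b = true) : edgeLe b a = true := by
  obtain ⟨a1, a2, a3⟩ := a; obtain ⟨b1, b2, b3⟩ := b
  simp [edgeLe] at *
  omega

theorem edgeLe_antisymm {a b : Int × Int × Int} (h1 : edgeLe a b = true) (h2 : edgeLe b a = true) : a = b := by
  obtain ⟨a1, a2, a3⟩ := a; obtain ⟨b1, b2, b3⟩ := b
  simp [edgeLe] at *
  omega

-- popMin facts
theorem popMin_perm : ∀ {l : List (Int × Int × Int)} {e rest}, popMin l = some (e, rest) → l.Perm (e :: rest) := by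
  intro l
  induction l with
  | nil => intro e rest h; simp [popMin] at h
  | cons x xs ih =>
    intro e rest h
    simp only [popMin] at h
    cases hx : popMin xs with
    | none =>
      rw [hx] at h
      obtain rfl : xs = [] := popMin_none_iff.mp hx
      simp at h
      rw [h.1, h.2]
    | some p =>
      obtain ⟨m, rest'⟩ := p
      rw [hx] at h
      have hp := ih (e := m) (rest := rest') (by rw [hx])
      by_cases hc : edgeLe x m = true
      · simp [hc] at h
        rw [← h.1, ← h.2]
      · simp [hc] at h
        rw [← h.1, ← h.2]
        exact (hp.cons x).trans (List.Perm.swap m x rest')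

theorem popMin_min : ∀ {l : List (Int × Int × Int)} {e rest}, popMin l = some (e, rest) → ∀ y ∈ l, edgeLe e y = true := by
  intro l
  induction l with
  | nil => intro e rest h; simp [popMin] at h
  | cons x xs ih =>
    intro e rest h y hy
    simp only [popMin] at h
    cases hx : popMin xs with
    | none =>
      rw [hx] at h
      obtain rfl : xs = [] := popMin_none_iff.mp hx
      simp at h hy
      obtain ⟨he, _⟩ := h
      subst he
      subst hy
      exact edgeLe_refl _
    | some p =>
      obtain ⟨m, rest'⟩ := p
      rw [hx] at h
      have hm := ih (e := m) (rest := rest') (by rw [hx])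
      by_cases hc : edgeLe x m = true
      · simp [hc] at h
        obtain ⟨he, _⟩ := h
        subst he
        rcases List.mem_cons.mp hy with hyx | hys
        · subst hyx; exact edgeLe_refl _
        · exact edgeLe_trans hc (hm y hys)
      · simp [hc] at h
        obtain ⟨he, _⟩ := h
        subst he
        rcases List.mem_cons.mp hy with hyx | hys
        · subst hyx; exact edgeLe_total hc
        · exact hm y hys

-- fuelled selection sort: the sequence of values A's pop loop extracts
def selSortF : Nat → List (Int × Int × Int) → List (Int × Int × Int)
  | 0, _ => []
  | k + 1, l =>
    match popMin l with
    | none => []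
    | some er => er.1 :: selSortF k er.2

theorem selSortF_perm : ∀ (k : Nat) (l : List (Int × Int × Int)), l.length ≤ k → (selSortF k l).Perm l := by
  intro k
  induction k with
  | zero =>
    intro l hl
    have : l = [] := List.length_eq_zero_iff.mp (by omega)
    simp [this, selSortF]
  | succ k ih =>
    intro l hl
    simp only [selSortF]
    cases hx : popMin l with
    | none =>
      obtain rfl : l = [] := popMin_none_iff.mp hx
      simp
    | some er =>
      obtain ⟨e, rest⟩ := er
      have hlen := popMin_length hx
      have hperm := popMin_perm hx
      exact (((ih rest (by omega)).cons e).trans hperm.symm)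

theorem selSortF_pairwise : ∀ (k : Nat) (l : List (Int × Int × Int)), l.length ≤ k → (selSortF k l).Pairwise (fun a b => edgeLe a b = true) := by
  intro k
  induction k with
  | zero => intro l hl; simp [selSortF]
  | succ k ih =>
    intro l hl
    simp only [selSortF]
    cases hx : popMin l with
    | none => simp
    | some er =>
      obtain ⟨e, rest⟩ := er
      have hlen := popMin_length hx
      refine List.Pairwise.cons ?_ (ih rest (by omega))
      intro y hy
      have hyr : y ∈ rest := ((selSortF_perm k rest (by omega)).mem_iff).mp hy
      have hyl : y ∈ l := (popMin_perm hx).mem_iff.mpr (by simp [hyr])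
      exact popMin_min hx y hyl

-- insertion sort (B's sorted() port) facts
theorem insertEdge_perm (e : Int × Int × Int) : ∀ (l : List (Int × Int × Int)), (pvInsertEdge e l).Perm (e :: l) := by
  intro l
  induction l with
  | nil => simp [pvInsertEdge]
  | cons x xs ih =>
    simp only [pvInsertEdge]
    by_cases hc : edgeLe x e = true
    · simp only [hc, if_pos]
      exact (ih.cons x).trans (List.Perm.swap e x xs)
    · simp [hc]

theorem insertEdge_pairwise (e : Int × Int × Int) : ∀ (l : List (Int × Int × Int)), l.Pairwise (fun a b => edgeLe a b = true) → (pvInsertEdge e l).Pairwise (fun a b => edgeLe a b = true) := by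
  intro l
  induction l with
  | nil => intro _; simp [pvInsertEdge]
  | cons x xs ih =>
    intro hp
    rw [List.pairwise_cons] at hp
    simp only [pvInsertEdge]
    by_cases hc : edgeLe x e = true
    · simp only [hc, if_pos]
      refine List.Pairwise.cons ?_ (ih hp.2)
      intro y hy
      rcases List.mem_cons.mp ((insertEdge_perm e xs).mem_iff.mp hy) with hye | hys
      · subst hye; exact hc
      · exact hp.1 y hys
    · simp only [hc, if_neg, Bool.not_eq_true]
      refine List.Pairwise.cons ?_ (List.pairwise_cons.mpr hp)
      intro y hy
      rcases List.mem_cons.mp hy with hyx | hys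
      · subst hyx; exact edgeLe_total hc
      · exact edgeLe_trans (edgeLe_total hc) (hp.1 y hys)

theorem insSort_perm (l : List (Int × Int × Int)) : (l.foldr pvInsertEdge []).Perm l := by
  induction l with
  | nil => simp
  | cons x xs ih => exact (insertEdge_perm x (xs.foldr pvInsertEdge [])).trans (ih.cons x)

theorem insSort_pairwise (l : List (Int × Int × Int)) : (l.foldr pvInsertEdge []).Pairwise (fun a b => edgeLe a b = true) := by
  induction l with
  | nil => simp
  | cons x xs ih => exact insertEdge_pairwise x _ ih

-- the two sorts agree (uniqueness of a sorted permutation under an antisymmetric order)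
theorem selSortF_eq_insSort (l : List (Int × Int × Int)) : selSortF l.length l = l.foldr pvInsertEdge [] := by
  exact List.Perm.eq_of_pairwise (fun a b _ _ h1 h2 => edgeLe_antisymm h1 h2)
    (selSortF_pairwise l.length l le_rfl)
    (insSort_pairwise l)
    ((selSortF_perm l.length l le_rfl).trans (insSort_perm l).symm)

-- A's pop loop is a fold over a prefix of the selection-sorted heap
theorem popLoop_eq : ∀ (k : Nat) (heap : List (Int × Int × Int)), heap.length ≤ k → ∀ (c m : Int) (st : List Int × List Int),
    popLoop heap c m st = ((selSortF k heap).take (m - c).toNat).foldl (fun st e => pvUnion st e.2.1 e.2.2) st := by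
  intro k
  induction k with
  | zero =>
    intro heap hl c m st
    obtain rfl : heap = [] := List.length_eq_zero_iff.mp (by omega)
    rw [popLoop]
    simp [selSortF]
  | succ k ih =>
    intro heap hl c m st
    rw [popLoop]
    by_cases hne : heap = []
    · subst hne
      simp [selSortF, popMin]
    · by_cases hc : c < m
      · rw [if_pos ⟨hne, hc⟩]
        simp only [selSortF]
        cases hx : popMin heap with
        | none => exact absurd (popMin_none_iff.mp hx) hne
        | some er =>
          obtain ⟨e, rest⟩ := er
          have hlen := popMin_length hx
          have htn : (m - c).toNat = (m - (c + 1)).toNat + 1 := by omega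
          rw [htn, List.take_succ_cons, List.foldl_cons]
          exact ih rest (by omega) (c + 1) m (pvUnion st e.2.1 e.2.2)
      · rw [if_neg (by tauto)]
        have : (m - c).toNat = 0 := by omega
        simp [this]

-- combinations(range(a, n), 2) is the nested i<j comprehension
theorem comb_pyRange : ∀ (k : Nat) (a n : Int), (n - a).toNat = k →
    PySem.List.combinations (PySem.List.pyRange a n 1) 2 =
      (PySem.List.pyRange a n 1).flatMap (fun i => (PySem.List.pyRange (i + 1) n 1).map (fun j => [i, j])) := by
  intro k
  induction k with
  | zero =>
    intro a n hk
    rw [PySem.List.pyRange_one_eq_nil (by omega)]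
    simp [PySem.List.combinations_nil_succ]
  | succ k ih =>
    intro a n hk
    have ha : a < n := by omega
    rw [PySem.List.pyRange_one_cons ha]
    rw [PySem.List.combinations_cons_succ, PySem.List.combinations_one]
    rw [List.flatMap_cons]
    congr 1
    · rw [List.map_map]
      rfl
    · exact ih (a + 1) n (by omega)

theorem edgesA_eq_edgesB (points : List (List Int)) : pvEdgesA points = pvEdgesB points := by
  unfold pvEdgesA pvEdgesB
  rw [comb_pyRange ((points.length : Int) - 0).toNat 0 points.length rfl]
  rw [List.map_flatMap]
  refine List.flatMap_congr ?_
  intro i _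
  rw [List.map_map]
  rfl

-- length of the edge list
theorem edgesB_len_aux : ∀ (k : Nat) (points : List (List Int)) (a : Int), 0 ≤ a → a ≤ (points.length : Int) → ((points.length : Int) - a).toNat = k →
    2 * (((PySem.List.pyRange a points.length 1).flatMap (fun i => (PySem.List.pyRange (i + 1) points.length 1).map (fun j => pvEdge points i j))).length : Int)
      = ((points.length : Int) - a) * ((points.length : Int) - a - 1) := by
  intro k
  induction k with
  | zero =>
    intro points a h0 han hk
    have : a = (points.length : Int) := by omega
    subst this
    rw [PySem.List.pyRange_one_eq_nil (by omega)]
    simp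
  | succ k ih =>
    intro points a h0 han hk
    have ha : a < (points.length : Int) := by omega
    rw [PySem.List.pyRange_one_cons ha, List.flatMap_cons, List.length_append, List.length_map,
        PySem.List.length_pyRange_one]
    have ihh := ih points (a + 1) (by omega) (by omega) (by omega)
    have hcast : ((((points.length : Int) - (a + 1)).toNat : Int)) = (points.length : Int) - a - 1 := by omega
    have hr : 2 * ((points.length : Int) - a - 1) + ((points.length : Int) - (a + 1)) * ((points.length : Int) - (a + 1) - 1)
        = ((points.length : Int) - a) * ((points.length : Int) - a - 1) := by ring
    push_cast
    push_cast at ihh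
    linarith [ihh, hr]

theorem take_min_of_len {α : Type} (xs : List α) (nc L : Int) (h : (xs.length : Int) = L) :
    xs.take (min nc L).toNat = xs.take nc.toNat := by
  rcases le_total nc L with hle | hle
  · rw [min_eq_left hle]
  · rw [min_eq_right hle, List.take_of_length_le (by omega), List.take_of_length_le (by omega)]

theorem pad_take (v : List Int) : padLoop (v.take 3) = (v ++ [1, 1, 1]).take 3 := by
  match v with
  | [] =>
    show padLoop [] = _
    rw [padLoop]; norm_num
    rw [padLoop]; norm_num
    rw [padLoop]; norm_num
    rw [padLoop]; norm_num
  | [a] =>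
    show padLoop [a] = _
    rw [padLoop]; norm_num
    rw [padLoop]; norm_num
    rw [padLoop]; norm_num
  | [a, b] =>
    show padLoop [a, b] = _
    rw [padLoop]; norm_num
    rw [padLoop]; norm_num
  | a :: b :: c :: t =>
    show padLoop [a, b, c] = _
    rw [padLoop]; norm_num

theorem edges_len (points : List (List Int)) :
    (((pvEdgesB points).length : Int)) = PySem.Int.floordiv ((points.length : Int) * ((points.length : Int) - 1)) 2 := by
  have h2 := edgesB_len_aux points.length points 0 le_rfl (by exact_mod_cast Nat.zero_le points.length) (by simp)
  rw [PySem.Int.floordiv_eq_ediv_of_pos (by norm_num)]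
  simp only [sub_zero] at h2
  rw [← h2]
  have : (pvEdgesB points).length = ((PySem.List.pyRange 0 points.length 1).flatMap (fun i => (PySem.List.pyRange (i + 1) points.length 1).map (fun j => pvEdge points i j))).length := rfl
  rw [this]
  omega

-- ===================================================================
-- Union-find ↔ label-array correspondence
-- ===================================================================

-- parent-chain iteration (no compression)
def iterP (p : List Int) : Nat → Int → Int
  | 0, x => x
  | k + 1, x => iterP p k (pvGetI p x)
def isRoot (p : List Int) (x : Int) : Prop := pvGetI p x = x
def InRange (p : List Int) : Prop :=
  ∀ x : Int, 0 ≤ x → x < (p.length : Int) → 0 ≤ pvGetI p x ∧ pvGetI p x < (p.length : Int)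

theorem iterP_add (p : List Int) : ∀ (a b : Nat) (x : Int), iterP p (a + b) x = iterP p b (iterP p a x) := by
  intro a
  induction a with
  | zero => intro b x; rw [Nat.zero_add]; rfl
  | succ a ih =>
    intro b x
    have : a + 1 + b = (a + b) + 1 := by omega
    rw [this]
    show iterP p (a + b) (pvGetI p x) = _
    rw [ih b (pvGetI p x)]
    rfl

theorem iter_of_isRoot {p : List Int} {x : Int} (h : isRoot p x) : ∀ k, iterP p k x = x := by
  intro k
  induction k with
  | zero => rfl
  | succ k ih =>
    show iterP p k (pvGetI p x) = x
    rw [h]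
    exact ih

theorem root_mono {p : List Int} {x : Int} {k : Nat} (h : isRoot p (iterP p k x)) :
    ∀ m, k ≤ m → iterP p m x = iterP p k x ∧ isRoot p (iterP p m x) := by
  intro m hm
  have : m = k + (m - k) := by omega
  rw [this, iterP_add, iter_of_isRoot h]
  exact ⟨rfl, h⟩

theorem root_unique {p : List Int} {x : Int} {k m : Nat} (h1 : isRoot p (iterP p k x)) (h2 : isRoot p (iterP p m x)) :
    iterP p k x = iterP p m x := by
  rcases le_total k m with h | h
  · exact (root_mono h1 m h).1.symm
  · exact (root_mono h2 k h).1

theorem iterP_range {p : List Int} (hR : InRange p) : ∀ (k : Nat) (x : Int), 0 ≤ x → x < (p.length : Int) →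
    0 ≤ iterP p k x ∧ iterP p k x < (p.length : Int) := by
  intro k
  induction k with
  | zero => intro x h0 h1; exact ⟨h0, h1⟩
  | succ k ih =>
    intro x h0 h1
    have := hR x h0 h1
    exact ih (pvGetI p x) this.1 this.2

theorem pvGetI_set (l : List Int) (i v y : Int) (hi0 : 0 ≤ i) (hil : i < (l.length : Int)) (hy0 : 0 ≤ y) :
    pvGetI (l.set i.toNat v) y = if y = i then v else pvGetI l y := by
  unfold pvGetI
  rw [PySem.List.pyGetD_of_nonneg _ _ hy0, PySem.List.pyGetD_of_nonneg _ _ hy0]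
  by_cases h : y = i
  · subst h
    simp only [reduceIte]
    rw [List.getD_eq_getElem?_getD, List.getElem?_set_self (by omega)]
    rfl
  · rw [if_neg h]
    rw [List.getD_eq_getElem?_getD, List.getD_eq_getElem?_getD, List.getElem?_set_ne (by omega)]

theorem pvGetI_map (f : Int → Int) (l : List Int) (x : Int) (h0 : 0 ≤ x) (h : x < (l.length : Int)) :
    pvGetI (l.map f) x = f (pvGetI l x) := by
  unfold pvGetI
  rw [PySem.List.pyGetD_eq_getElem _ _ h0 (by simpa using h), PySem.List.pyGetD_eq_getElem _ _ h0 h]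
  simp

def Compressed (p q : List Int) : Prop :=
  q.length = p.length ∧ ∀ y : Int, 0 ≤ y → y < (p.length : Int) →
    pvGetI q y = pvGetI p y ∨ (¬ isRoot p y ∧ ∃ k, isRoot p (iterP p k y) ∧ pvGetI q y = iterP p k y)

theorem compressed_refl (p : List Int) : Compressed p p := ⟨rfl, fun y _ _ => Or.inl rfl⟩

theorem compress_iter {p q : List Int} (hC : Compressed p q) (hR : InRange p) :
    ∀ (k : Nat) (y : Int), 0 ≤ y → y < (p.length : Int) → isRoot p (iterP p k y) →
      iterP q k y = iterP p k y ∧ isRoot q (iterP q k y) := by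
  intro k
  induction k with
  | zero =>
    intro y hy0 hy1 hroot
    refine ⟨rfl, ?_⟩
    -- isRoot q y from isRoot p y
    rcases hC.2 y hy0 hy1 with h | h
    · show pvGetI q y = y; rw [h]; exact hroot
    · exact absurd hroot h.1
  | succ k ih =>
    intro y hy0 hy1 hroot
    by_cases hry : isRoot p y
    · have hq : isRoot q y := by
        rcases hC.2 y hy0 hy1 with h | h
        · show pvGetI q y = y; rw [h]; exact hry
        · exact absurd hry h.1
      rw [iter_of_isRoot hq, iter_of_isRoot hry]
      exact ⟨rfl, hq⟩
    · rcases hC.2 y hy0 hy1 with h | h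
      · -- q y = p y
        have hz := hR y hy0 hy1
        have := ih (pvGetI p y) hz.1 hz.2 hroot
        show iterP q k (pvGetI q y) = _ ∧ isRoot q (iterP q k (pvGetI q y))
        rw [h]
        exact this
      · obtain ⟨hnr, k0, hk0root, hqy⟩ := h
        have hequ : iterP p k0 y = iterP p (k + 1) y := root_unique hk0root hroot
        have hrange := iterP_range hR k0 y hy0 hy1
        have hrootq : isRoot q (iterP p k0 y) := by
          rcases hC.2 (iterP p k0 y) hrange.1 hrange.2 with h2 | h2
          · show pvGetI q _ = _; rw [h2]; exact hk0root
          · exact absurd hk0root h2.1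
        show iterP q k (pvGetI q y) = _ ∧ isRoot q (iterP q k (pvGetI q y))
        rw [hqy, iter_of_isRoot hrootq, hequ]
        exact ⟨rfl, by rw [← hequ]; exact hrootq⟩

theorem compress_inrange {p q : List Int} (hC : Compressed p q) (hR : InRange p) : InRange q := by
  intro y hy0 hy1
  rw [hC.1] at hy1
  rw [hC.1]
  rcases hC.2 y hy0 hy1 with h | h
  · rw [h]; exact hR y hy0 hy1
  · obtain ⟨_, k, _, hqy⟩ := h
    rw [hqy]
    exact iterP_range hR k y hy0 hy1

theorem find_spec : ∀ (f : Nat) (p : List Int) (x : Int), InRange p → 0 ≤ x → x < (p.length : Int) →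
    isRoot p (iterP p f x) →
    (pvFind f p x).2 = iterP p f x ∧ Compressed p (pvFind f p x).1 := by
  intro f
  induction f with
  | zero =>
    intro p x hR hx0 hx1 hroot
    exact ⟨rfl, compressed_refl p⟩
  | succ f ih =>
    intro p x hR hx0 hx1 hroot
    show ((if pvGetI p x = x then (p, x) else
      let r := pvFind f p (pvGetI p x)
      (r.1.set x.toNat r.2, r.2)).2 = _) ∧ Compressed p (if pvGetI p x = x then (p, x) else
      let r := pvFind f p (pvGetI p x)
      (r.1.set x.toNat r.2, r.2)).1
    by_cases hpx : pvGetI p x = x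
    · rw [if_pos hpx]
      exact ⟨(iter_of_isRoot hpx (f + 1)).symm, compressed_refl p⟩
    · rw [if_neg hpx]
      have hz := hR x hx0 hx1
      have hroot' : isRoot p (iterP p f (pvGetI p x)) := hroot
      obtain ⟨hr, hC⟩ := ih p (pvGetI p x) hR hz.1 hz.2 hroot'
      have hrval : (pvFind f p (pvGetI p x)).2 = iterP p (f + 1) x := hr
      refine ⟨hrval, ?_, ?_⟩
      · -- length
        have : (pvFind f p (pvGetI p x)).1.length = p.length := hC.1
        simp [this]
      · intro y hy0 hy1
        have hxlen : x < ((pvFind f p (pvGetI p x)).1.length : Int) := by rw [hC.1]; exact hx1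
        rw [pvGetI_set _ _ _ _ hx0 hxlen hy0]
        by_cases hyx : y = x
        · subst hyx
          rw [if_pos rfl]
          exact Or.inr ⟨hpx, f + 1, hroot, hrval⟩
        · rw [if_neg hyx]
          exact hC.2 y hy0 hy1

structure UFInv (n : Nat) (p sz comp : List Int) : Prop where
  hp : p.length = n
  hsz : sz.length = n
  hcomp : comp.length = n
  hrange : InRange p
  hdepth : ∀ x : Int, 0 ≤ x → x < (n : Int) → isRoot p (iterP p (comp.count (pvGetI comp x) - 1) x)
  hclass : ∀ x y : Int, 0 ≤ x → x < (n : Int) → 0 ≤ y → y < (n : Int) →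
    (iterP p n x = iterP p n y ↔ pvGetI comp x = pvGetI comp y)
  hsize : ∀ x : Int, 0 ≤ x → x < (n : Int) →
    pvGetI sz (iterP p n x) = (comp.count (pvGetI comp x) : Int)

theorem count_le_n {n : Nat} {comp : List Int} (hlen : comp.length = n) (v : Int) :
    comp.count v ≤ n := hlen ▸ List.count_le_length

theorem inv_isRoot_n {n : Nat} {p sz comp : List Int} (inv : UFInv n p sz comp) :
    ∀ x : Int, 0 ≤ x → x < (n : Int) → isRoot p (iterP p n x) := by
  intro x h0 h1
  have hd := inv.hdepth x h0 h1
  exact (root_mono hd n (by have := count_le_n inv.hcomp (pvGetI comp x); omega)).2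

theorem inv_compress {n : Nat} {p q sz comp : List Int} (inv : UFInv n p sz comp) (hC : Compressed p q) :
    UFInv n q sz comp := by
  have hplen : p.length = n := inv.hp
  have hiter : ∀ (k : Nat) (x : Int), 0 ≤ x → x < (n : Int) → isRoot p (iterP p k x) →
      iterP q k x = iterP p k x ∧ isRoot q (iterP q k x) := by
    intro k x h0 h1
    exact compress_iter hC inv.hrange k x h0 (by rw [hplen]; exact h1)
  have hrootn := inv_isRoot_n inv
  refine ⟨hC.1.trans hplen, inv.hsz, inv.hcomp, compress_inrange hC inv.hrange, ?_, ?_, ?_⟩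
  · intro x h0 h1
    have hd := inv.hdepth x h0 h1
    exact (hiter _ x h0 h1 hd).2
  · intro x y hx0 hx1 hy0 hy1
    rw [(hiter n x hx0 hx1 (hrootn x hx0 hx1)).1, (hiter n y hy0 hy1 (hrootn y hy0 hy1)).1]
    exact inv.hclass x y hx0 hx1 hy0 hy1
  · intro x h0 h1
    rw [(hiter n x h0 h1 (hrootn x h0 h1)).1]
    exact inv.hsize x h0 h1

theorem count_pos_at {n : Nat} {comp : List Int} (hlen : comp.length = n) (x : Int) (h0 : 0 ≤ x) (h : x < (n : Int)) :
    0 < comp.count (pvGetI comp x) := by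
  apply List.count_pos_iff.mpr
  have hx : x < (comp.length : Int) := by rw [hlen]; exact h
  rw [pvGetI, PySem.List.pyGetD_eq_getElem _ _ h0 hx]
  exact List.getElem_mem _

theorem count_relabel (ci cj v : Int) (h : ci ≠ cj) (l : List Int) :
    (l.map (fun c => if c = cj then ci else c)).count v =
      if v = ci then l.count ci + l.count cj else if v = cj then 0 else l.count v := by
  induction l with
  | nil => simp
  | cons x xs ih =>
    simp only [List.map_cons, List.count_cons, ih]
    by_cases hxj : x = cj <;> by_cases hvi : v = ci <;> by_cases hvj : v = cj <;>
      by_cases hxi : x = ci <;> by_cases hxv : x = v <;>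
      simp_all <;> omega

theorem set_iter_ne {p : List Int} {w l : Int} (hR : InRange p) (hRl : isRoot p l)
    (hl0 : 0 ≤ l) (hll : l < (p.length : Int)) :
    ∀ (k : Nat) (y : Int), 0 ≤ y → y < (p.length : Int) → isRoot p (iterP p k y) → iterP p k y ≠ l →
      iterP (p.set l.toNat w) k y = iterP p k y ∧ isRoot (p.set l.toNat w) (iterP p k y) := by
  intro k
  induction k with
  | zero =>
    intro y hy0 hy1 hroot hne
    refine ⟨rfl, ?_⟩
    show pvGetI (p.set l.toNat w) y = y
    rw [pvGetI_set p l w y hl0 hll hy0, if_neg (show y ≠ l from hne)]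
    exact hroot
  | succ k ih =>
    intro y hy0 hy1 hroot hne
    by_cases hry : isRoot p y
    · have hyval : iterP p (k + 1) y = y := iter_of_isRoot hry _
      rw [hyval] at hne ⊢
      have hq : isRoot (p.set l.toNat w) y := by
        show pvGetI (p.set l.toNat w) y = y
        rw [pvGetI_set p l w y hl0 hll hy0, if_neg hne]
        exact hry
      exact ⟨iter_of_isRoot hq _, hq⟩
    · have hyne : y ≠ l := fun hh => hry (hh ▸ hRl)
      have hz := hR y hy0 hy1
      have hstep : pvGetI (p.set l.toNat w) y = pvGetI p y := by
        rw [pvGetI_set p l w y hl0 hll hy0, if_neg hyne]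
      have hroot' : isRoot p (iterP p k (pvGetI p y)) := hroot
      have hne' : iterP p k (pvGetI p y) ≠ l := hne
      have := ih (pvGetI p y) hz.1 hz.2 hroot' hne'
      show iterP (p.set l.toNat w) k (pvGetI (p.set l.toNat w) y) = _ ∧
        isRoot (p.set l.toNat w) (iterP p k (pvGetI p y))
      rw [hstep]
      exact this

theorem set_iter_eq {p : List Int} {w l : Int} (hR : InRange p) (hRl : isRoot p l) (hRw : isRoot p w)
    (hl0 : 0 ≤ l) (hll : l < (p.length : Int)) (hw0 : 0 ≤ w) (hwlen : w < (p.length : Int)) (hwl : w ≠ l) :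
    ∀ (k : Nat) (y : Int), 0 ≤ y → y < (p.length : Int) → isRoot p (iterP p k y) → iterP p k y = l →
      iterP (p.set l.toNat w) (k + 1) y = w ∧ isRoot (p.set l.toNat w) w := by
  have hqw : isRoot (p.set l.toNat w) w := by
    show pvGetI (p.set l.toNat w) w = w
    rw [pvGetI_set p l w w hl0 hll hw0, if_neg hwl]
    exact hRw
  intro k
  induction k with
  | zero =>
    intro y hy0 hy1 hroot heq
    have hyl : y = l := heq
    refine ⟨?_, hqw⟩
    show iterP (p.set l.toNat w) 0 (pvGetI (p.set l.toNat w) y) = w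
    rw [pvGetI_set p l w y hl0 hll hy0, if_pos hyl]
    rfl
  | succ k ih =>
    intro y hy0 hy1 hroot heq
    by_cases hry : isRoot p y
    · have hyval : iterP p (k + 1) y = y := iter_of_isRoot hry _
      have hyl : y = l := hyval.symm.trans heq
      refine ⟨?_, hqw⟩
      show iterP (p.set l.toNat w) (k + 1) (pvGetI (p.set l.toNat w) y) = w
      rw [pvGetI_set p l w y hl0 hll hy0, if_pos hyl]
      exact iter_of_isRoot hqw _
    · have hyne : y ≠ l := fun hh => hry (hh ▸ hRl)
      have hz := hR y hy0 hy1
      have := ih (pvGetI p y) hz.1 hz.2 hroot heq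
      refine ⟨?_, hqw⟩
      show iterP (p.set l.toNat w) (k + 1) (pvGetI (p.set l.toNat w) y) = w
      rw [pvGetI_set p l w y hl0 hll hy0, if_neg hyne]
      exact this.1

theorem inv_link {n : Nat} {p sz comp : List Int} (inv : UFInv n p sz comp) (i j w l : Int)
    (hi0 : 0 ≤ i) (hi : i < (n : Int)) (hj0 : 0 ≤ j) (hj : j < (n : Int))
    (hne : iterP p n i ≠ iterP p n j)
    (hwl : (w = iterP p n i ∧ l = iterP p n j) ∨ (w = iterP p n j ∧ l = iterP p n i)) :
    UFInv n (p.set l.toNat w) (sz.set w.toNat (pvGetI sz w + pvGetI sz l))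
      (comp.map (fun c => if c = pvGetI comp j then pvGetI comp i else c)) := by
  have hpl : (p.length : Int) = (n : Int) := by rw [inv.hp]
  have hR := inv.hrange
  set ra := iterP p n i with hra_def
  set rb := iterP p n j with hrb_def
  set ci := pvGetI comp i with hci_def
  set cj := pvGetI comp j with hcj_def
  have hcij : ci ≠ cj := fun h => hne ((inv.hclass i j hi0 hi hj0 hj).mpr h)
  have hrra : isRoot p ra := inv_isRoot_n inv i hi0 hi
  have hrrb : isRoot p rb := inv_isRoot_n inv j hj0 hj
  have hra_rng := iterP_range hR n i hi0 (by rw [hpl]; exact hi)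
  have hrb_rng := iterP_range hR n j hj0 (by rw [hpl]; exact hj)
  have hRw : isRoot p w := by rcases hwl with ⟨h1, _⟩ | ⟨h1, _⟩ <;> rw [h1] <;> assumption
  have hRl : isRoot p l := by rcases hwl with ⟨_, h2⟩ | ⟨_, h2⟩ <;> rw [h2] <;> assumption
  have hw0 : 0 ≤ w := by rcases hwl with ⟨h1, _⟩ | ⟨h1, _⟩ <;> rw [h1] <;> [exact hra_rng.1; exact hrb_rng.1]
  have hw1 : w < (p.length : Int) := by rcases hwl with ⟨h1, _⟩ | ⟨h1, _⟩ <;> rw [h1] <;> [exact hra_rng.2; exact hrb_rng.2]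
  have hl0 : 0 ≤ l := by rcases hwl with ⟨_, h2⟩ | ⟨_, h2⟩ <;> rw [h2] <;> [exact hrb_rng.1; exact hra_rng.1]
  have hl1 : l < (p.length : Int) := by rcases hwl with ⟨_, h2⟩ | ⟨_, h2⟩ <;> rw [h2] <;> [exact hrb_rng.2; exact hra_rng.2]
  have hwlne : w ≠ l := by rcases hwl with ⟨h1, h2⟩ | ⟨h1, h2⟩ <;> rw [h1, h2] <;> [exact hne; exact fun hh => hne hh.symm]
  set p' := p.set l.toNat w with hp'_def
  set f := (fun c : Int => if c = cj then ci else c) with hf_def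
  -- per-node facts
  have hx_ra : ∀ x : Int, 0 ≤ x → x < (n : Int) → (iterP p n x = ra ↔ pvGetI comp x = ci) :=
    fun x h0 h1 => inv.hclass x i h0 h1 hi0 hi
  have hx_rb : ∀ x : Int, 0 ≤ x → x < (n : Int) → (iterP p n x = rb ↔ pvGetI comp x = cj) :=
    fun x h0 h1 => inv.hclass x j h0 h1 hj0 hj
  have hlab : ∀ x : Int, 0 ≤ x → x < (n : Int) →
      ((iterP p n x = l ∨ iterP p n x = w) ↔ (pvGetI comp x = ci ∨ pvGetI comp x = cj)) := by
    intro x h0 h1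
    rcases hwl with ⟨h1w, h2l⟩ | ⟨h1w, h2l⟩
    · rw [h1w, h2l, hx_ra x h0 h1, hx_rb x h0 h1]
      tauto
    · rw [h1w, h2l, hx_ra x h0 h1, hx_rb x h0 h1]
  -- counts
  have hcnt_i : 0 < comp.count ci := count_pos_at inv.hcomp i hi0 hi
  have hcnt_j : 0 < comp.count cj := count_pos_at inv.hcomp j hj0 hj
  have hsz_ra : pvGetI sz ra = (comp.count ci : Int) := inv.hsize i hi0 hi
  have hsz_rb : pvGetI sz rb = (comp.count cj : Int) := inv.hsize j hj0 hj
  -- root characterization in p'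
  have hchar : ∀ x : Int, 0 ≤ x → x < (n : Int) →
      iterP p' n x = (if iterP p n x = l then w else iterP p n x) := by
    intro x h0 h1
    have hx1 : x < (p.length : Int) := by rw [hpl]; exact h1
    have hd := inv.hdepth x h0 h1
    set d := comp.count (pvGetI comp x) - 1 with hd_def
    have hdn : d ≤ n := by have := count_le_n inv.hcomp (pvGetI comp x); omega
    have hmono := root_mono hd n hdn
    by_cases hxl : iterP p n x = l
    · rw [if_pos hxl]
      have hdl : iterP p d x = l := by rw [← hmono.1]; exact hxl
      have hse := set_iter_eq hR hRl hRw hl0 hl1 hw0 hw1 hwlne d x h0 hx1 hd hdl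
      have hroot' : isRoot p' (iterP p' (d + 1) x) := by rw [hse.1]; exact hse.2
      have hcnt1 : 0 < comp.count (pvGetI comp x) := count_pos_at inv.hcomp x h0 h1
      have hcle := count_le_n inv.hcomp (pvGetI comp x)
      have hle : d + 1 ≤ n := by omega
      have := root_mono hroot' n hle
      rw [this.1]
      exact hse.1
    · rw [if_neg hxl]
      have hdl : iterP p d x ≠ l := by rw [← hmono.1]; exact hxl
      have hse := set_iter_ne (w := w) hR hRl hl0 hl1 d x h0 hx1 hd hdl
      have hroot' : isRoot p' (iterP p' d x) := by rw [hse.1]; exact hse.2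
      have := root_mono hroot' n hdn
      rw [this.1, hse.1, ← hmono.1]
  refine ⟨?_, ?_, ?_, ?_, ?_, ?_, ?_⟩
  · simp [hp'_def, inv.hp]
  · simp [inv.hsz]
  · simp [inv.hcomp]
  · -- InRange p'
    intro y hy0 hy1
    have hlen : (p'.length : Int) = (p.length : Int) := by simp [hp'_def]
    rw [hlen] at hy1 ⊢
    rw [hp'_def, pvGetI_set p l w y hl0 hl1 hy0]
    by_cases h : y = l
    · rw [if_pos h]; exact ⟨hw0, hw1⟩
    · rw [if_neg h]; exact hR y hy0 hy1
  · -- depth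
    intro x h0 h1
    have hx1 : x < (p.length : Int) := by rw [hpl]; exact h1
    have hcx := pvGetI_map f comp x h0 (by rw [inv.hcomp]; exact h1)
    set cx := pvGetI comp x with hcx_def
    have hd := inv.hdepth x h0 h1
    set d := comp.count cx - 1 with hd_def
    have hcnt1 : 0 < comp.count cx := count_pos_at inv.hcomp x h0 h1
    have hdn : d ≤ n := by have := count_le_n inv.hcomp cx; omega
    have hmono := root_mono hd n hdn
    have hcnt' := count_relabel ci cj (f cx) hcij comp
    rw [hcx]
    by_cases hmember : cx = ci ∨ cx = cj
    · have hfcx : f cx = ci := by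
        simp only [hf_def]
        rcases hmember with h | h
        · rw [h, if_neg hcij]
        · rw [h, if_pos rfl]
      rw [hfcx] at hcnt' ⊢
      rw [if_pos rfl] at hcnt'
      rw [hcnt']
      have hcnt_le : comp.count cx ≤ comp.count ci + comp.count cj - 1 := by
        rcases hmember with h | h <;> rw [← h] <;> omega
      by_cases hxl : iterP p n x = l
      · have hdl : iterP p d x = l := by rw [← hmono.1]; exact hxl
        have hse := set_iter_eq hR hRl hRw hl0 hl1 hw0 hw1 hwlne d x h0 hx1 hd hdl
        have hroot' : isRoot p' (iterP p' (d + 1) x) := by rw [hse.1]; exact hse.2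
        have hle : d + 1 ≤ comp.count ci + comp.count cj - 1 := by omega
        exact (root_mono hroot' _ hle).2
      · have hdl : iterP p d x ≠ l := by rw [← hmono.1]; exact hxl
        have hse := set_iter_ne (w := w) hR hRl hl0 hl1 d x h0 hx1 hd hdl
        have hroot' : isRoot p' (iterP p' d x) := by rw [hse.1]; exact hse.2
        have hle : d ≤ comp.count ci + comp.count cj - 1 := by omega
        exact (root_mono hroot' _ hle).2
    · have hfcx : f cx = cx := by
        simp only [hf_def]
        rw [if_neg (fun h => hmember (Or.inr h))]
      rw [hfcx] at hcnt' ⊢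
      rw [if_neg (fun h => hmember (Or.inl h)), if_neg (fun h => hmember (Or.inr h))] at hcnt'
      rw [hcnt']
      have hxl : iterP p n x ≠ l := by
        intro hh
        exact hmember ((hlab x h0 h1).mp (Or.inl hh))
      have hdl : iterP p d x ≠ l := by rw [← hmono.1]; exact hxl
      have hse := set_iter_ne (w := w) hR hRl hl0 hl1 d x h0 hx1 hd hdl
      rw [hse.1] at *
      exact hse.2
  · -- classes
    intro x y hx0 hx1 hy0 hy1
    rw [hchar x hx0 hx1, hchar y hy0 hy1]
    rw [pvGetI_map f comp x hx0 (by rw [inv.hcomp]; exact hx1),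
        pvGetI_map f comp y hy0 (by rw [inv.hcomp]; exact hy1)]
    have hcls := inv.hclass x y hx0 hx1 hy0 hy1
    have hlx := hlab x hx0 hx1
    have hly := hlab y hy0 hy1
    set rx := iterP p n x
    set ry := iterP p n y
    set cx := pvGetI comp x
    set cy := pvGetI comp y
    by_cases hmx : cx = ci ∨ cx = cj
    · have hfx : f cx = ci := by rcases hmx with h | h <;> simp [hf_def, h, hcij]
      have hrx : rx = l ∨ rx = w := hlx.mpr hmx
      have hvx : (if rx = l then w else rx) = w := by
        rcases hrx with h | h
        · rw [if_pos h]
        · by_cases h2 : rx = l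
          · rw [if_pos h2]
          · rw [if_neg h2]; exact h
      by_cases hmy : cy = ci ∨ cy = cj
      · have hfy : f cy = ci := by
          simp only [hf_def]
          rcases hmy with h | h
          · rw [h, if_neg hcij]
          · rw [h, if_pos rfl]
        have hry : ry = l ∨ ry = w := hly.mpr hmy
        have hvy : (if ry = l then w else ry) = w := by
          rcases hry with h | h
          · rw [if_pos h]
          · by_cases h2 : ry = l
            · rw [if_pos h2]
            · rw [if_neg h2]; exact h
        rw [hvx, hvy, hfx, hfy]
        simp
      · have hfy : f cy = cy := by
          simp only [hf_def]
          rw [if_neg (fun h => hmy (Or.inr h))]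
        have hry : ¬ (ry = l ∨ ry = w) := fun h => hmy (hly.mp h)
        have hvy : (if ry = l then w else ry) = ry := by rw [if_neg (fun h => hry (Or.inl h))]
        rw [hvx, hvy, hfx, hfy]
        constructor
        · intro h; exact absurd (Or.inr h.symm) hry
        · intro h; exact absurd (Or.inl h.symm) hmy
    · have hfx : f cx = cx := by
        simp only [hf_def]
        rw [if_neg (fun h => hmx (Or.inr h))]
      have hrx : ¬ (rx = l ∨ rx = w) := fun h => hmx (hlx.mp h)
      have hvx : (if rx = l then w else rx) = rx := by rw [if_neg (fun h => hrx (Or.inl h))]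
      by_cases hmy : cy = ci ∨ cy = cj
      · have hfy : f cy = ci := by
          simp only [hf_def]
          rcases hmy with h | h
          · rw [h, if_neg hcij]
          · rw [h, if_pos rfl]
        have hry : ry = l ∨ ry = w := hly.mpr hmy
        have hvy : (if ry = l then w else ry) = w := by
          rcases hry with h | h
          · rw [if_pos h]
          · by_cases h2 : ry = l
            · rw [if_pos h2]
            · rw [if_neg h2]; exact h
        rw [hvx, hvy, hfx, hfy]
        constructor
        · intro h; exact absurd (Or.inr h) hrx
        · intro h; exact absurd (Or.inl h) hmx
      · have hfy : f cy = cy := by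
          simp only [hf_def]
          rw [if_neg (fun h => hmy (Or.inr h))]
        have hvy : (if ry = l then w else ry) = ry := by
          rw [if_neg (fun h => (fun hh => hmy (hly.mp hh)) (Or.inl h))]
        rw [hvx, hvy, hfx, hfy]
        exact hcls
  · -- sizes
    intro x h0 h1
    rw [hchar x h0 h1]
    rw [pvGetI_map f comp x h0 (by rw [inv.hcomp]; exact h1)]
    have hszlen : w < (sz.length : Int) := by rw [inv.hsz]; rw [hpl] at hw1; exact hw1
    have hsum : pvGetI sz w + pvGetI sz l = (comp.count ci : Int) + (comp.count cj : Int) := by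
      rcases hwl with ⟨h1w, h2l⟩ | ⟨h1w, h2l⟩
      · rw [h1w, h2l, hsz_ra, hsz_rb]
      · rw [h1w, h2l, hsz_ra, hsz_rb]; ring
    have hcnt' := count_relabel ci cj (f (pvGetI comp x)) hcij comp
    set cx := pvGetI comp x with hcx_def
    by_cases hmx : cx = ci ∨ cx = cj
    · have hfx : f cx = ci := by rcases hmx with h | h <;> simp [hf_def, h, hcij]
      have hrx : iterP p n x = l ∨ iterP p n x = w := (hlab x h0 h1).mpr hmx
      have hvx : (if iterP p n x = l then w else iterP p n x) = w := by
        rcases hrx with h | h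
        · rw [if_pos h]
        · by_cases h2 : iterP p n x = l
          · rw [if_pos h2]
          · rw [if_neg h2]; exact h
      rw [hvx, hfx]
      rw [hfx, if_pos rfl] at hcnt'
      rw [hcnt']
      rw [pvGetI_set sz w _ w hw0 hszlen hw0, if_pos rfl]
      push_cast
      exact hsum
    · have hfx : f cx = cx := by
        simp only [hf_def]
        rw [if_neg (fun h => hmx (Or.inr h))]
      have hrx : ¬ (iterP p n x = l ∨ iterP p n x = w) := fun h => hmx ((hlab x h0 h1).mp h)
      have hvx : (if iterP p n x = l then w else iterP p n x) = iterP p n x := by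
        rw [if_neg (fun h => hrx (Or.inl h))]
      rw [hvx, hfx]
      rw [hfx, if_neg (fun h => hmx (Or.inl h)), if_neg (fun h => hmx (Or.inr h))] at hcnt'
      rw [hcnt']
      have hxrng := iterP_range hR n x h0 (by rw [hpl]; exact h1)
      rw [pvGetI_set sz w _ (iterP p n x) hw0 hszlen hxrng.1,
          if_neg (fun h => hrx (Or.inr h))]
      exact inv.hsize x h0 h1

theorem inv_union {n : Nat} {p sz comp : List Int} (inv : UFInv n p sz comp) (i j : Int)
    (hi0 : 0 ≤ i) (hi : i < (n : Int)) (hj0 : 0 ≤ j) (hj : j < (n : Int)) :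
    UFInv n (pvUnion (p, sz) i j).1 (pvUnion (p, sz) i j).2 (pvCompUnion comp i j) := by
  have hgood := inv_isRoot_n inv
  have hs1 := find_spec p.length p i inv.hrange hi0 (by rw [inv.hp]; exact hi)
    (by rw [inv.hp]; exact hgood i hi0 hi)
  rcases hf1 : pvFind p.length p i with ⟨p1, r1⟩
  rw [hf1] at hs1
  obtain ⟨hr1, hC1⟩ := hs1
  simp only at hr1
  rw [inv.hp] at hr1
  have inv1 := inv_compress inv hC1
  have hs2 := find_spec p1.length p1 j inv1.hrange hj0 (by rw [inv1.hp]; exact hj)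
    (by rw [inv1.hp]; exact inv_isRoot_n inv1 j hj0 hj)
  rcases hf2 : pvFind p1.length p1 j with ⟨p2, r2⟩
  rw [hf2] at hs2
  obtain ⟨hr2, hC2⟩ := hs2
  simp only at hr2
  rw [inv1.hp] at hr2
  have inv2 := inv_compress inv1 hC2
  -- root values in p2
  have hstep1 : iterP p1 n i = iterP p n i :=
    (compress_iter hC1 inv.hrange n i hi0 (by rw [inv.hp]; exact hi) (hgood i hi0 hi)).1
  have hstep1' : iterP p1 n j = iterP p n j :=
    (compress_iter hC1 inv.hrange n j hj0 (by rw [inv.hp]; exact hj) (hgood j hj0 hj)).1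
  have hstep2 : iterP p2 n i = iterP p1 n i :=
    (compress_iter hC2 inv1.hrange n i hi0 (by rw [inv1.hp]; exact hi) (inv_isRoot_n inv1 i hi0 hi)).1
  have hstep2' : iterP p2 n j = iterP p1 n j :=
    (compress_iter hC2 inv1.hrange n j hj0 (by rw [inv1.hp]; exact hj) (inv_isRoot_n inv1 j hj0 hj)).1
  have hri : iterP p2 n i = r1 := by rw [hstep2, hstep1, ← hr1]
  have hrj : iterP p2 n j = r2 := by rw [hstep2', ← hr2]
  simp only [pvUnion, hf1, hf2]
  by_cases heq : r1 = r2
  · rw [if_pos heq]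
    have hceq : pvGetI comp i = pvGetI comp j := by
      exact (inv2.hclass i j hi0 hi hj0 hj).mp (by rw [hri, hrj, heq])
    have hcompeq : pvCompUnion comp i j = comp := by
      simp only [pvCompUnion]
      rw [if_neg (by simp [hceq])]
    rw [hcompeq]
    exact inv2
  · rw [if_neg heq]
    have hcne : pvGetI comp i ≠ pvGetI comp j := by
      intro h
      exact heq (by rw [← hri, ← hrj]; exact (inv2.hclass i j hi0 hi hj0 hj).mpr h)
    have hcompeq : pvCompUnion comp i j = comp.map (fun c => if c = pvGetI comp j then pvGetI comp i else c) := by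
      simp only [pvCompUnion]
      rw [if_pos hcne]
    rw [hcompeq]
    have hnei : iterP p2 n i ≠ iterP p2 n j := by rw [hri, hrj]; exact heq
    by_cases hlt : pvGetI sz r1 < pvGetI sz r2
    · rw [if_pos hlt]
      exact inv_link inv2 i j r2 r1 hi0 hi hj0 hj hnei (Or.inr ⟨hrj.symm, hri.symm⟩)
    · rw [if_neg hlt]
      exact inv_link inv2 i j r1 r2 hi0 hi hj0 hj hnei (Or.inl ⟨hri.symm, hrj.symm⟩)

theorem inv_fold {n : Nat} : ∀ (es : List (Int × Int × Int)) (p sz comp : List Int),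
    UFInv n p sz comp →
    (∀ e ∈ es, 0 ≤ e.2.1 ∧ e.2.1 < (n : Int) ∧ 0 ≤ e.2.2 ∧ e.2.2 < (n : Int)) →
    UFInv n (es.foldl (fun st e => pvUnion st e.2.1 e.2.2) (p, sz)).1
      (es.foldl (fun st e => pvUnion st e.2.1 e.2.2) (p, sz)).2
      (es.foldl (fun c e => pvCompUnion c e.2.1 e.2.2) comp) := by
  intro es
  induction es with
  | nil => intro p sz comp inv _; exact inv
  | cons e es ih =>
    intro p sz comp inv hb
    have hbe := hb e (by simp)
    have hstep := inv_union inv e.2.1 e.2.2 hbe.1 hbe.2.1 hbe.2.2.1 hbe.2.2.2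
    have := ih (pvUnion (p, sz) e.2.1 e.2.2).1 (pvUnion (p, sz) e.2.1 e.2.2).2
      (pvCompUnion comp e.2.1 e.2.2) hstep (fun x hx => hb x (by simp [hx]))
    simpa using this

theorem inv_init (n : Nat) :
    UFInv n (PySem.List.pyRange 0 n 1) (List.replicate n 1) (PySem.List.pyRange 0 n 1) := by
  have hrange_eq : PySem.List.pyRange 0 (n : Int) 1 = (List.range n).map (fun k : Nat => (k : Int)) :=
    PySem.List.pyRange_zero_natCast n
  have hlen : (PySem.List.pyRange 0 (n : Int) 1).length = n := by
    rw [hrange_eq, List.length_map, List.length_range]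
  have hget : ∀ x : Int, 0 ≤ x → x < (n : Int) → pvGetI (PySem.List.pyRange 0 (n : Int) 1) x = x := by
    intro x h0 h1
    rw [pvGetI, hrange_eq,
        PySem.List.pyGetD_eq_getElem _ _ h0 (by rw [List.length_map, List.length_range]; exact h1),
        List.getElem_map, List.getElem_range]
    omega
  have hcount : ∀ x : Int, 0 ≤ x → x < (n : Int) →
      (PySem.List.pyRange 0 (n : Int) 1).count x = 1 := by
    intro x h0 h1
    rw [hrange_eq]
    apply List.count_eq_one_of_mem
    · exact (List.nodup_range).map (fun a b h => by omega)
    · exact List.mem_map.mpr ⟨x.toNat, List.mem_range.mpr (by omega), by omega⟩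
  refine ⟨hlen, List.length_replicate, hlen, ?_, ?_, ?_, ?_⟩
  · intro x h0 h1
    rw [hlen] at h1
    rw [hget x h0 h1, hlen]
    exact ⟨h0, h1⟩
  · intro x h0 h1
    show pvGetI _ (iterP _ _ x) = iterP _ _ x
    rw [iter_of_isRoot (hget x h0 h1) _, hget x h0 h1]
  · intro x y hx0 hx1 hy0 hy1
    rw [iter_of_isRoot (hget x hx0 hx1) _, iter_of_isRoot (hget y hy0 hy1) _,
        hget x hx0 hx1, hget y hy0 hy1]
  · intro x h0 h1
    rw [iter_of_isRoot (hget x h0 h1) _, hget x h0 h1, hcount x h0 h1]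
    rw [pvGetI, PySem.List.pyGetD_eq_getElem _ _ h0 (by rw [List.length_replicate]; exact h1)]
    rw [List.getElem_replicate]
    rfl

theorem sizes_loop_eq {n : Nat} (pf sz : List Int) :
    ∀ (L : List Int) (q : List Int) (d : PySem.Dict Int Int),
    q.length = n → InRange q → (∀ x : Int, 0 ≤ x → x < (n : Int) → isRoot q (iterP q n x)) →
    (∀ x : Int, 0 ≤ x → x < (n : Int) → iterP q n x = iterP pf n x) →
    (∀ x ∈ L, 0 ≤ x ∧ x < (n : Int)) →
    (L.foldl (fun (s : List Int × PySem.Dict Int Int) idx =>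
        let f := pvFind s.1.length s.1 idx
        (f.1, s.2.insert f.2 (pvGetI sz f.2))) (q, d)).2
      = L.foldl (fun d idx => d.insert (iterP pf n idx) (pvGetI sz (iterP pf n idx))) d := by
  intro L
  induction L with
  | nil => intro q d _ _ _ _ _; rfl
  | cons idx L ih =>
    intro q d hqlen hqR hqroot hqagree hmem
    have hidx := hmem idx (by simp)
    have hs := find_spec q.length q idx hqR hidx.1 (by rw [hqlen]; exact hidx.2)
      (by rw [hqlen]; exact hqroot idx hidx.1 hidx.2)
    rcases hf : pvFind q.length q idx with ⟨q', r⟩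
    rw [hf] at hs
    obtain ⟨hr, hC⟩ := hs
    simp only at hr
    rw [hqlen] at hr
    have hrval : r = iterP pf n idx := by
      rw [hr]; exact hqagree idx hidx.1 hidx.2
    have hq'len : q'.length = n := hC.1.trans hqlen
    have hq'R : InRange q' := compress_inrange hC hqR
    have hq'root : ∀ x : Int, 0 ≤ x → x < (n : Int) → isRoot q' (iterP q' n x) := by
      intro x h0 h1
      exact (compress_iter hC hqR n x h0 (by rw [hqlen]; exact h1) (hqroot x h0 h1)).2
    have hq'agree : ∀ x : Int, 0 ≤ x → x < (n : Int) → iterP q' n x = iterP pf n x := by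
      intro x h0 h1
      rw [(compress_iter hC hqR n x h0 (by rw [hqlen]; exact h1) (hqroot x h0 h1)).1]
      exact hqagree x h0 h1
    simp only [List.foldl_cons, hf]
    rw [hrval]
    exact ih q' (d.insert (iterP pf n idx) (pvGetI sz (iterP pf n idx))) hq'len hq'R hq'root hq'agree
      (fun x hx => hmem x (by simp [hx]))

theorem items_fold_insert_keyfun (g : Int → Int) :
    ∀ (ks : List Int) (d : PySem.Dict Int Int) (S : List Int),
    d.items = S.map (fun k => (k, g k)) →
    (ks.foldl (fun d k => d.insert k (g k)) d).items
      = (PySem.Set.update S ks).map (fun k => (k, g k)) := by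
  intro ks
  induction ks with
  | nil => intro d S h; exact h
  | cons k ks ih =>
    intro d S h
    have hkeys : d.keys = S := by
      simp only [PySem.Dict.keys, h, List.map_map]
      exact List.map_id S
    have hcont : d.contains k = decide (k ∈ S) := by
      rw [PySem.Dict.contains_eq_decide_mem_keys, hkeys]
    simp only [List.foldl_cons]
    by_cases hmem : k ∈ S
    · have hc : d.contains k = true := by rw [hcont]; simp [hmem]
      have hitems : (d.insert k (g k)).items = d.items := by
        rw [PySem.Dict.items_insert_of_contains d (g k) hc, h]
        rw [List.map_map]
        apply List.map_congr_left
        intro a _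
        by_cases hak : a = k
        · subst hak; simp
        · simp [hak]
      have hadd : PySem.Set.add S k = S := by
        simp only [PySem.Set.add, PySem.Set.contains]
        rw [if_pos (by rwa [List.contains_iff_mem])]
      show ((ks.foldl (fun d k => d.insert k (g k)) (d.insert k (g k))).items) = _
      rw [ih (d.insert k (g k)) S (hitems.trans h)]
      show _ = (PySem.Set.update (PySem.Set.add S k) ks).map _
      rw [hadd]
    · have hc : d.contains k = false := by rw [hcont]; simp [hmem]
      have hitems : (d.insert k (g k)).items = (S ++ [k]).map (fun k => (k, g k)) := by
        rw [PySem.Dict.items_insert_of_not_contains d (g k) hc, h, List.map_append]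
        rfl
      have hadd : PySem.Set.add S k = S ++ [k] := by
        simp only [PySem.Set.add, PySem.Set.contains]
        rw [if_neg (by rw [List.contains_iff_mem]; simpa using hmem)]
      show ((ks.foldl (fun d k => d.insert k (g k)) (d.insert k (g k))).items) = _
      rw [ih (d.insert k (g k)) (S ++ [k]) hitems]
      show _ = (PySem.Set.update (PySem.Set.add S k) ks).map _
      rw [hadd]

theorem forall2_mem_sync {P : Int → Int → Prop} :
    ∀ {s t : List Int}, List.Forall₂ P s t → ∀ (u v : Int), (∀ a b, P a b → (a = u ↔ b = v)) →
      (u ∈ s ↔ v ∈ t) := by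
  intro s t h
  induction h with
  | nil => intro u v _; simp
  | @cons a b s t hab _ ih =>
    intro u v hb
    simp only [List.mem_cons]
    rw [ih u v hb]
    constructor
    · rintro (h | h)
      · exact Or.inl ((hb a b hab).mp h.symm).symm
      · exact Or.inr h
    · rintro (h | h)
      · exact Or.inl ((hb a b hab).mpr h.symm).symm
      · exact Or.inr h

theorem forall2_append_single {P : Int → Int → Prop} : ∀ {s t : List Int}, List.Forall₂ P s t →
    ∀ {u v : Int}, P u v → List.Forall₂ P (s ++ [u]) (t ++ [v]) := by
  intro s t h
  induction h with
  | nil => intro u v huv; simpa using List.Forall₂.cons huv List.Forall₂.nil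
  | cons hab _ ih =>
    intro u v huv
    exact List.Forall₂.cons hab (ih huv)

theorem forall2_setfold (κ lam : Int → Int) (Q : Int → Prop)
    (E : ∀ a b, Q a → Q b → (κ a = κ b ↔ lam a = lam b)) :
    ∀ (L s t : List Int), (∀ x ∈ L, Q x) →
    List.Forall₂ (fun u v => ∃ a, Q a ∧ u = κ a ∧ v = lam a) s t →
    List.Forall₂ (fun u v => ∃ a, Q a ∧ u = κ a ∧ v = lam a)
      (PySem.Set.update s (L.map κ)) (PySem.Set.update t (L.map lam)) := by
  intro L
  induction L with
  | nil => intro s t _ h; exact h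
  | cons x L ih =>
    intro s t hQ h
    have hQx := hQ x (by simp)
    have hsync : (κ x ∈ s ↔ lam x ∈ t) := by
      apply forall2_mem_sync h
      rintro a b ⟨c, hQc, rfl, rfl⟩
      constructor
      · intro hh; exact (E c x hQc hQx).mp hh
      · intro hh; exact (E c x hQc hQx).mpr hh
    simp only [List.map_cons]
    show List.Forall₂ _ (PySem.Set.update (PySem.Set.add s (κ x)) (L.map κ))
      (PySem.Set.update (PySem.Set.add t (lam x)) (L.map lam))
    by_cases hmem : κ x ∈ s
    · have hmem' : lam x ∈ t := hsync.mp hmem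
      have h1 : PySem.Set.add s (κ x) = s := by
        simp only [PySem.Set.add, PySem.Set.contains]
        rw [if_pos (by rwa [List.contains_iff_mem])]
      have h2 : PySem.Set.add t (lam x) = t := by
        simp only [PySem.Set.add, PySem.Set.contains]
        rw [if_pos (by rwa [List.contains_iff_mem])]
      rw [h1, h2]
      exact ih s t (fun y hy => hQ y (by simp [hy])) h
    · have hmem' : lam x ∉ t := fun hh => hmem (hsync.mpr hh)
      have h1 : PySem.Set.add s (κ x) = s ++ [κ x] := by
        simp only [PySem.Set.add, PySem.Set.contains]
        rw [if_neg (by rw [List.contains_iff_mem]; simpa using hmem)]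
      have h2 : PySem.Set.add t (lam x) = t ++ [lam x] := by
        simp only [PySem.Set.add, PySem.Set.contains]
        rw [if_neg (by rw [List.contains_iff_mem]; simpa using hmem')]
      rw [h1, h2]
      exact ih (s ++ [κ x]) (t ++ [lam x]) (fun y hy => hQ y (by simp [hy]))
        (forall2_append_single h ⟨x, hQx, rfl, rfl⟩)

theorem map_eq_of_forall2 {P : Int → Int → Prop} {g h : Int → Int} :
    ∀ {s t : List Int}, List.Forall₂ P s t → (∀ u v, P u v → g u = h v) → s.map g = t.map h := by
  intro s t hf
  induction hf with
  | nil => intro _; rfl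
  | @cons a b s t hab _ ih =>
    intro hgh
    simp only [List.map_cons]
    rw [hgh a b hab, ih hgh]

theorem values_eq {n : Nat} {pf sz comp : List Int} (inv : UFInv n pf sz comp) :
    (pvSizes n ((pf, sz) : List Int × List Int)).values
      = (comp.foldl (fun (d : PySem.Dict Int Int) c => d.insert c (d.getD c 0 + 1)) PySem.Dict.empty).values := by
  have hB : (comp.foldl (fun (d : PySem.Dict Int Int) c => d.insert c (d.getD c 0 + 1)) PySem.Dict.empty).values
      = (PySem.Set.ofList comp).map (fun k => ((comp.count k : Int))) := by
    rw [PySem.Dict.foldl_insert_getD_add_one_eq_counter]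
    simp only [PySem.Dict.values, PySem.Dict.items_counter, List.map_map]
    rfl
  have hA0 := sizes_loop_eq pf sz (PySem.List.pyRange 0 n 1) pf PySem.Dict.empty
    inv.hp inv.hrange (inv_isRoot_n inv) (fun _ _ _ => rfl)
    (fun x hx => by
      have := PySem.List.mem_pyRange_one.mp hx
      constructor <;> omega)
  have hA : (pvSizes n ((pf, sz) : List Int × List Int)).values
      = (PySem.Set.ofList ((PySem.List.pyRange 0 n 1).map (fun idx => iterP pf n idx))).map
          (fun r => pvGetI sz r) := by
    show ((PySem.List.pyRange 0 n 1).foldl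
        (fun (s : List Int × PySem.Dict Int Int) idx =>
          let f := pvFind s.1.length s.1 idx
          (f.1, s.2.insert f.2 (pvGetI sz f.2))) (pf, PySem.Dict.empty)).2.values = _
    rw [hA0]
    have hfold : (PySem.List.pyRange 0 n 1).foldl
        (fun (d : PySem.Dict Int Int) idx => d.insert (iterP pf n idx) (pvGetI sz (iterP pf n idx))) PySem.Dict.empty
      = ((PySem.List.pyRange 0 n 1).map (fun idx => iterP pf n idx)).foldl
        (fun (d : PySem.Dict Int Int) k => d.insert k (pvGetI sz k)) PySem.Dict.empty := by
      rw [List.foldl_map]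
    rw [hfold]
    have := items_fold_insert_keyfun (fun r => pvGetI sz r)
      ((PySem.List.pyRange 0 n 1).map (fun idx => iterP pf n idx)) PySem.Dict.empty [] (by rfl)
    simp only [PySem.Dict.values, this]
    rw [List.map_map, PySem.Set.ofList_eq_foldl]
    rfl
  rw [hA, hB]
  -- comp is the lam-image of the index range
  have hcomp_eq : comp = (PySem.List.pyRange 0 n 1).map (fun idx => pvGetI comp idx) := by
    have := PySem.List.map_pyGetD_pyRange_zero comp (0 : Int)
    rw [show PySem.List.len comp = ((n : Nat) : Int) from by
      simp [PySem.List.len, inv.hcomp]] at this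
    exact this.symm
  have hQ : ∀ x ∈ PySem.List.pyRange 0 (n : Int) 1, 0 ≤ x ∧ x < (n : Int) := by
    intro x hx
    have := PySem.List.mem_pyRange_one.mp hx
    constructor <;> omega
  have hforall := forall2_setfold (fun idx => iterP pf n idx) (fun idx => pvGetI comp idx)
    (fun x => 0 ≤ x ∧ x < (n : Int))
    (fun a b ha hb => inv.hclass a b ha.1 ha.2 hb.1 hb.2)
    (PySem.List.pyRange 0 n 1) [] [] hQ List.Forall₂.nil
  rw [PySem.Set.ofList_eq_foldl, PySem.Set.ofList_eq_foldl]
  conv_lhs => rw [show (List.foldl PySem.Set.add [] ((PySem.List.pyRange 0 n 1).map (fun idx => iterP pf n idx)))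
    = PySem.Set.update [] ((PySem.List.pyRange 0 n 1).map (fun idx => iterP pf n idx)) from rfl]
  conv_rhs => rw [hcomp_eq]
  conv_rhs => rw [show (List.foldl PySem.Set.add [] ((PySem.List.pyRange 0 n 1).map (fun idx => pvGetI comp idx)))
    = PySem.Set.update [] ((PySem.List.pyRange 0 n 1).map (fun idx => pvGetI comp idx)) from rfl]
  apply map_eq_of_forall2 hforall
  rintro u v ⟨a, ha, rfl, rfl⟩
  rw [inv.hsize a ha.1 ha.2]
  rw [← hcomp_eq]

theorem pvGetI_take3 (l : List Int) (k : Int) (h0 : 0 ≤ k) (h3 : k < 3) (hl : 3 ≤ (l.length : Int)) :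
    pvGetI (l.take 3) k = pvGetI l k := by
  rw [pvGetI, pvGetI,
      PySem.List.pyGetD_eq_getElem _ _ h0 (by simp; omega),
      PySem.List.pyGetD_eq_getElem _ _ h0 (by omega)]
  rw [List.getElem_take]

theorem chosen_bounds (points : List (List Int)) (nc : Nat) :
    ∀ e ∈ (((pvEdgesB points).foldr pvInsertEdge []).take nc),
      0 ≤ e.2.1 ∧ e.2.1 < (points.length : Int) ∧ 0 ≤ e.2.2 ∧ e.2.2 < (points.length : Int) := by
  intro e he
  have h1 : e ∈ (pvEdgesB points).foldr pvInsertEdge [] := List.mem_of_mem_take he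
  have h2 : e ∈ pvEdgesB points := (insSort_perm (pvEdgesB points)).mem_iff.mp h1
  unfold pvEdgesB at h2
  obtain ⟨i, hi, he2⟩ := List.mem_flatMap.mp h2
  obtain ⟨j, hj, rfl⟩ := List.mem_map.mp he2
  have hib := PySem.List.mem_pyRange_one.mp hi
  have hjb := PySem.List.mem_pyRange_one.mp hj
  simp only [pvEdge]
  refine ⟨hib.1, hib.2, by omega, hjb.2⟩

-- ===== VERDICT (by name: the statement is the Claim_ definition above) =====
theorem connect_closest_spec : Claim_equal_connect_closest := by
  intro points nc _ _
  unfold Spec_connect_closest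
  show connect_closest points nc = connect_closest_alt points nc
  simp only [connect_closest, connect_closest_alt]
  rw [PySem.List.foldl_append_singleton_eq_self, List.nil_append, edgesA_eq_edgesB]
  rw [popLoop_eq (pvEdgesB points).length (pvEdgesB points) le_rfl]
  rw [selSortF_eq_insSort]
  rw [sub_zero]
  have hlen : ((((pvEdgesB points).foldr pvInsertEdge []).length : Int))
      = PySem.Int.floordiv ((points.length : Int) * ((points.length : Int) - 1)) 2 := by
    rw [(insSort_perm (pvEdgesB points)).length_eq]
    exact edges_len points
  rw [take_min_of_len _ nc _ hlen]
  rw [show (max nc 0).toNat = nc.toNat from by omega]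
  set n := points.length with hn_def
  set chosen := ((pvEdgesB points).foldr pvInsertEdge []).take nc.toNat with hchosen_def
  have hbounds : ∀ e ∈ chosen, 0 ≤ e.2.1 ∧ e.2.1 < (n : Int) ∧ 0 ≤ e.2.2 ∧ e.2.2 < (n : Int) :=
    chosen_bounds points nc.toNat
  have inv := inv_fold chosen (PySem.List.pyRange 0 n 1) (List.replicate n 1)
    (PySem.List.pyRange 0 n 1) (inv_init n) hbounds
  have hv := values_eq inv
  rw [Prod.mk.eta] at hv
  rw [hv]
  rw [pad_take]
  have hlen3 : (3 : Int) ≤ (((PySem.List.sorted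
      ((chosen.foldl (fun (c : List Int) (e : Int × Int × Int) => pvCompUnion c e.2.1 e.2.2) (PySem.List.pyRange 0 n 1)).foldl
        (fun (d : PySem.Dict Int Int) c => d.insert c (d.getD c 0 + 1)) PySem.Dict.empty).values
      (fun v => v) true) ++ [1, 1, 1]).length : Int) := by
    rw [List.length_append, show ([(1 : Int), 1, 1].length) = 3 from rfl]
    push_cast
    omega
  rw [pvGetI_take3 _ 0 (by norm_num) (by norm_num) hlen3,
      pvGetI_take3 _ 1 (by norm_num) (by norm_num) hlen3,
      pvGetI_take3 _ 2 (by norm_num) (by norm_num) hlen3]
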